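-- pv_equiv track=rewrite | github.com/HMixany/Moduls | game_2_2.py | generation_map
-- ===== SOURCE A (Python) =====
-- HEIGHT = 5
--
-- WIDTH = 5
--
-- def generation_map(char_x, char_y, char_sign,
--                    enemy_x, enemy_y, enemy_sign,
--                    exit_x, exit_y, exit_sing,
--                    width=WIDTH, height=HEIGHT):
--
--     world_map = ''
--     for j in range(height):
--         row = '|'
--         for i in range(width):
--             if char_x == i and char_y == j:
--                 row += char_sign + '|'
--             elif enemy_x == i and enemy_y == j:
--                 row += enemy_sign + '|'
--             elif exit_x == i and exit_y == j:
--                 row += exit_sing + '|'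
--             else:
--                 row += '  |'
--         world_map += f'{row}\n'
--
--     return world_map
-- ===== SOURCE B (Python) =====
-- def generation_map(char_x, char_y, char_sign,
--                    enemy_x, enemy_y, enemy_sign,
--                    exit_x, exit_y, exit_sing,
--                    width=5, height=5):
--     # Blank canvas first, then three point updates (later wins on collision,
--     # so priority is char > enemy > exit), then a single join; no per-cell decision.
--     grid = [['  '] * width for _ in range(height)]
--     for x, y, sign in ((exit_x, exit_y, exit_sing),
--                        (enemy_x, enemy_y, enemy_sign),
--                        (char_x, char_y, char_sign)):
--         if 0 <= x < width and 0 <= y < height: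
--             grid[y][x] = sign
--     return ''.join('|' + ''.join(c + '|' for c in row) + '\n' for row in grid)
-- ===== Notes on version B (the rewrite author's own statement) =====
-- stated objective: alternative
-- what changed: Instead of deciding each cell with a three-branch elif chain inside nested loops, B builds a blank width-by-height grid of ' ' cells, performs three bounds-checked point updates (exit, enemy, char in that order so later updates encode priority on collisions), and renders the finished grid with a single join; the per-cell conditional disappears entirely.
import Mathlib
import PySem

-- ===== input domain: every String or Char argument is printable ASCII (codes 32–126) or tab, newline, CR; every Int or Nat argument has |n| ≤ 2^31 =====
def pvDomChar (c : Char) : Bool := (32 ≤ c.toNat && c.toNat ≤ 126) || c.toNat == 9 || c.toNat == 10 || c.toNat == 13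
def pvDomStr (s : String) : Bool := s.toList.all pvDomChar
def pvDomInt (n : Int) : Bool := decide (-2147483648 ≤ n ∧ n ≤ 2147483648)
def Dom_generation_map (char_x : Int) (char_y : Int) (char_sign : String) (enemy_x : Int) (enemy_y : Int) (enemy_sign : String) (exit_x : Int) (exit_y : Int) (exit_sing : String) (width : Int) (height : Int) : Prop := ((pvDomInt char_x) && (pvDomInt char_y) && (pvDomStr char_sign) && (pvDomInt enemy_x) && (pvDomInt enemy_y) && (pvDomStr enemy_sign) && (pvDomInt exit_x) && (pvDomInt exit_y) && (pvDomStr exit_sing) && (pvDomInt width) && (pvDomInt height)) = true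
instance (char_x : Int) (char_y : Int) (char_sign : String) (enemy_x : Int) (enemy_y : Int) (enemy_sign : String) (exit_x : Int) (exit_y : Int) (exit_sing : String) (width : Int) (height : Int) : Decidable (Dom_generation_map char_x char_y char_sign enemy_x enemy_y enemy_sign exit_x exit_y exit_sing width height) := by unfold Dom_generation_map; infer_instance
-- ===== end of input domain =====

-- B builds a blank grid, applies three bounds-checked point updates, and joins; objective: alternative decomposition (same cost).

-- ===== PORT A =====
def generation_map (char_x : Int) (char_y : Int) (char_sign : String) (enemy_x : Int) (enemy_y : Int) (enemy_sign : String) (exit_x : Int) (exit_y : Int) (exit_sing : String) (width : Int) (height : Int) : String :=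
  (PySem.List.pyRange 0 height 1).foldl (fun world_map j =>
    world_map ++
      ((PySem.List.pyRange 0 width 1).foldl (fun row i =>
        if char_x = i ∧ char_y = j then row ++ (char_sign ++ "|")
        else if enemy_x = i ∧ enemy_y = j then row ++ (enemy_sign ++ "|")
        else if exit_x = i ∧ exit_y = j then row ++ (exit_sing ++ "|")
        else row ++ "  |") "|") ++ "\n") ""

-- ===== PORT B =====
-- one bounds-checked point update grid[y][x] = sign (no-op when out of range)
def pvPlace (width height : Int) (grid : List (List String)) (m : Int × Int × String) : List (List String) :=
  if 0 ≤ m.1 ∧ m.1 < width ∧ 0 ≤ m.2.1 ∧ m.2.1 < height then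
    grid.set m.2.1.toNat ((grid.getD m.2.1.toNat []).set m.1.toNat m.2.2)
  else grid

def generation_map_alt (char_x : Int) (char_y : Int) (char_sign : String) (enemy_x : Int) (enemy_y : Int) (enemy_sign : String) (exit_x : Int) (exit_y : Int) (exit_sing : String) (width : Int) (height : Int) : String :=
  let grid0 := List.replicate height.toNat (List.replicate width.toNat "  ")
  let grid := [(exit_x, exit_y, exit_sing),
               (enemy_x, enemy_y, enemy_sign),
               (char_x, char_y, char_sign)].foldl (pvPlace width height) grid0
  String.join (grid.map (fun row =>
    "|" ++ String.join (row.map (fun c => c ++ "|")) ++ "\n"))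

-- ===== PRECONDITION & SPEC =====
def Spec_generation_map (char_x : Int) (char_y : Int) (char_sign : String) (enemy_x : Int) (enemy_y : Int) (enemy_sign : String) (exit_x : Int) (exit_y : Int) (exit_sing : String) (width : Int) (height : Int) (out : String) : Prop := out = generation_map_alt char_x char_y char_sign enemy_x enemy_y enemy_sign exit_x exit_y exit_sing width height
instance (char_x : Int) (char_y : Int) (char_sign : String) (enemy_x : Int) (enemy_y : Int) (enemy_sign : String) (exit_x : Int) (exit_y : Int) (exit_sing : String) (width : Int) (height : Int) (out : String) : Decidable (Spec_generation_map char_x char_y char_sign enemy_x enemy_y enemy_sign exit_x exit_y exit_sing width height out) := by unfold Spec_generation_map; infer_instance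

-- ===== CLAIM (what is proved, stated in full; the proofs are below) =====
def Claim_equal_generation_map : Prop := ∀ (char_x : Int) (char_y : Int) (char_sign : String) (enemy_x : Int) (enemy_y : Int) (enemy_sign : String) (exit_x : Int) (exit_y : Int) (exit_sing : String) (width : Int) (height : Int), Dom_generation_map char_x char_y char_sign enemy_x enemy_y enemy_sign exit_x exit_y exit_sing width height → Spec_generation_map char_x char_y char_sign enemy_x enemy_y enemy_sign exit_x exit_y exit_sing width height (generation_map char_x char_y char_sign enemy_x enemy_y enemy_sign exit_x exit_y exit_sing width height)

-- ===== LEMMAS AND PROOFS =====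

-- the value A writes into cell (i, j), without the trailing '|'
def pvCell (char_x char_y : Int) (char_sign : String) (enemy_x enemy_y : Int)
    (enemy_sign : String) (exit_x exit_y : Int) (exit_sing : String) (i j : Int) : String :=
  if char_x = i ∧ char_y = j then char_sign
  else if enemy_x = i ∧ enemy_y = j then enemy_sign
  else if exit_x = i ∧ exit_y = j then exit_sing
  else "  "

theorem string_foldl_append_start (l : List String) (s : String) :
    l.foldl (· ++ ·) s = s ++ l.foldl (· ++ ·) "" := by
  induction l generalizing s with
  | nil => simp
  | cons x xs ih =>
    simp only [List.foldl]
    rw [ih (s ++ x), ih ("" ++ x)]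
    simp [String.append_assoc]

theorem string_join_cons (x : String) (l : List String) :
    String.join (x :: l) = x ++ String.join l := by
  simp only [String.join, List.foldl]
  rw [string_foldl_append_start]
  simp

theorem string_foldl_append_join {α : Type} (f : α → String) (l : List α) (s : String) :
    l.foldl (fun acc x => acc ++ f x) s = s ++ String.join (l.map f) := by
  induction l generalizing s with
  | nil => simp [String.join]
  | cons x xs ih =>
    simp only [List.foldl, List.map]
    rw [ih, string_join_cons, String.append_assoc]

theorem getD_set {α : Type} (l : List α) (n m : Nat) (a d : α) :
    (l.set n a).getD m d = if m = n ∧ n < l.length then a else l.getD m d := by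
  simp only [List.getD, List.getElem?_set]
  split_ifs with h h1 h2 <;> simp_all

theorem length_pvPlace (w h : Int) (g : List (List String)) (m : Int × Int × String) :
    (pvPlace w h g m).length = g.length := by
  unfold pvPlace; split_ifs <;> simp

theorem rowlen_pvPlace (w h : Int) (g : List (List String)) (m : Int × Int × String) (j : Nat) :
    ((pvPlace w h g m).getD j []).length = (g.getD j []).length := by
  unfold pvPlace
  split_ifs with hb
  · rw [getD_set]
    split_ifs with h1
    · rw [List.length_set, h1.1]
    · rfl
  · rfl

theorem gget_pvPlace (w h : Int) (g : List (List String)) (x y : Int) (s : String)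
    (i j : Nat) (hi : (i : Int) < w) (hj : (j : Int) < h)
    (hg : g.length = h.toNat)
    (hrow : ∀ k : Nat, (k : Int) < h → (g.getD k []).length = w.toNat) :
    ((pvPlace w h g (x, y, s)).getD j []).getD i "  " =
      if x = (i : Int) ∧ y = (j : Int) then s else (g.getD j []).getD i "  " := by
  simp only [pvPlace]
  split_ifs with hb heq heq
  · rcases heq with ⟨hx, hy⟩
    subst hx; subst hy
    simp only [Int.toNat_natCast]
    rw [getD_set]
    rw [if_pos ⟨by omega, by omega⟩]
    rw [getD_set]
    have := hrow j hj
    rw [if_pos ⟨by omega, by omega⟩]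
  · -- in bounds but not this cell
    rw [getD_set]
    split_ifs with h1
    · rw [getD_set]
      split_ifs with h2
      · exfalso; apply heq; constructor <;> omega
      · have : y.toNat = j := h1.1.symm
        simp [this]
    · rfl
  · -- out of bounds yet equal: impossible since i, j are in range
    exfalso; apply hb
    rcases heq with ⟨hx, hy⟩
    refine ⟨by omega, by omega, by omega, by omega⟩
  · rfl

theorem gget_grid0 (w h : Int) (i j : Nat) (hi : (i : Int) < w) (hj : (j : Int) < h) :
    ((List.replicate h.toNat (List.replicate w.toNat "  ")).getD j []).getD i "  " = "  " := by
  have hj' : j < h.toNat := by omega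
  have hi' : i < w.toNat := by omega
  have h1 : (List.replicate h.toNat (List.replicate w.toNat "  ")).getD j [] =
      List.replicate w.toNat "  " := by
    rw [List.getD_eq_getElem _ _ (by simpa using hj')]
    simp
  rw [h1, List.getD_eq_getElem _ _ (by simpa using hi')]
  simp

theorem grid_eq (char_x char_y : Int) (char_sign : String) (enemy_x enemy_y : Int)
    (enemy_sign : String) (exit_x exit_y : Int) (exit_sing : String) (width height : Int) :
    ([(exit_x, exit_y, exit_sing), (enemy_x, enemy_y, enemy_sign),
      (char_x, char_y, char_sign)].foldl (pvPlace width height)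
        (List.replicate height.toNat (List.replicate width.toNat "  "))) =
    (PySem.List.pyRange 0 height 1).map (fun j =>
      (PySem.List.pyRange 0 width 1).map (fun i =>
        pvCell char_x char_y char_sign enemy_x enemy_y enemy_sign exit_x exit_y exit_sing i j)) := by
  set g0 := List.replicate height.toNat (List.replicate width.toNat "  ") with hg0
  set g1 := pvPlace width height g0 (exit_x, exit_y, exit_sing) with hg1
  set g2 := pvPlace width height g1 (enemy_x, enemy_y, enemy_sign) with hg2
  set g3 := pvPlace width height g2 (char_x, char_y, char_sign) with hg3
  have hlen0 : g0.length = height.toNat := by simp [hg0]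
  have hlen1 : g1.length = height.toNat := by rw [hg1, length_pvPlace, hlen0]
  have hlen2 : g2.length = height.toNat := by rw [hg2, length_pvPlace, hlen1]
  have hlen3 : g3.length = height.toNat := by rw [hg3, length_pvPlace, hlen2]
  have hrow0 : ∀ k : Nat, (k : Int) < height → (g0.getD k []).length = width.toNat := by
    intro k hk
    rw [hg0, List.getD_eq_getElem _ _ (by simp; omega)]
    simp
  have hrow1 : ∀ k : Nat, (k : Int) < height → (g1.getD k []).length = width.toNat := by
    intro k hk; rw [hg1, rowlen_pvPlace]; exact hrow0 k hk
  have hrow2 : ∀ k : Nat, (k : Int) < height → (g2.getD k []).length = width.toNat := by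
    intro k hk; rw [hg2, rowlen_pvPlace]; exact hrow1 k hk
  have hcell : ∀ i j : Nat, (i : Int) < width → (j : Int) < height →
      (g3.getD j []).getD i "  " =
        pvCell char_x char_y char_sign enemy_x enemy_y enemy_sign exit_x exit_y exit_sing i j := by
    intro i j hi hj
    rw [hg3, gget_pvPlace width height g2 _ _ _ i j hi hj hlen2 hrow2,
        hg2, gget_pvPlace width height g1 _ _ _ i j hi hj hlen1 hrow1,
        hg1, gget_pvPlace width height g0 _ _ _ i j hi hj hlen0 hrow0,
        gget_grid0 width height i j hi hj]
    rfl
  show g3 = _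
  apply List.ext_getElem
  · rw [hlen3]; simp [PySem.List.length_pyRange_one]
  · intro j hj1 hj2
    have hjh : (j : Int) < height := by rw [hlen3] at hj1; omega
    have hrow3 : (g3.getD j []).length = width.toNat := by
      rw [hg3, rowlen_pvPlace]; exact hrow2 j hjh
    rw [List.getElem_map, PySem.List.getElem_pyRange_one]
    apply List.ext_getElem
    · rw [← List.getD_eq_getElem _ _ hj1, hrow3]
      simp [PySem.List.length_pyRange_one]
    · intro i hi1 hi2
      have hlj : g3[j].length = width.toNat := by
        rw [← List.getD_eq_getElem _ _ hj1]; exact hrow3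
      have hiw : (i : Int) < width := by rw [hlj] at hi1; omega
      rw [List.getElem_map, PySem.List.getElem_pyRange_one]
      calc g3[j][i] = g3[j].getD i "  " := (List.getD_eq_getElem _ _ hi1).symm
        _ = (g3.getD j []).getD i "  " := by rw [List.getD_eq_getElem _ _ hj1]
        _ = pvCell char_x char_y char_sign enemy_x enemy_y enemy_sign exit_x exit_y exit_sing i j :=
            hcell i j hiw hjh
        _ = pvCell char_x char_y char_sign enemy_x enemy_y enemy_sign exit_x exit_y exit_sing (0 + i) (0 + j) := by
            norm_num

-- ===== VERDICT (by name: the statement is the Claim_ definition above) =====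
theorem generation_map_spec : Claim_equal_generation_map := by
  intro char_x char_y char_sign enemy_x enemy_y enemy_sign exit_x exit_y exit_sing width height _
  unfold Spec_generation_map generation_map generation_map_alt
  simp only [grid_eq]
  have hA : ∀ j : Int, ((PySem.List.pyRange 0 width 1).foldl (fun row i =>
        if char_x = i ∧ char_y = j then row ++ (char_sign ++ "|")
        else if enemy_x = i ∧ enemy_y = j then row ++ (enemy_sign ++ "|")
        else if exit_x = i ∧ exit_y = j then row ++ (exit_sing ++ "|")
        else row ++ "  |") "|") =
      "|" ++ String.join ((PySem.List.pyRange 0 width 1).map (fun i =>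
        pvCell char_x char_y char_sign enemy_x enemy_y enemy_sign exit_x exit_y exit_sing i j ++ "|")) := by
    intro j
    have : ((PySem.List.pyRange 0 width 1).foldl (fun row i =>
        if char_x = i ∧ char_y = j then row ++ (char_sign ++ "|")
        else if enemy_x = i ∧ enemy_y = j then row ++ (enemy_sign ++ "|")
        else if exit_x = i ∧ exit_y = j then row ++ (exit_sing ++ "|")
        else row ++ "  |") "|") =
      ((PySem.List.pyRange 0 width 1).foldl (fun row i =>
        row ++ (pvCell char_x char_y char_sign enemy_x enemy_y enemy_sign exit_x exit_y exit_sing i j ++ "|")) "|") := by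
      apply PySem.List.foldl_congr_mem
      intro row i _
      unfold pvCell
      split_ifs <;> rfl
    rw [this, string_foldl_append_join]
  calc (PySem.List.pyRange 0 height 1).foldl (fun world_map j =>
        world_map ++
          ((PySem.List.pyRange 0 width 1).foldl (fun row i =>
            if char_x = i ∧ char_y = j then row ++ (char_sign ++ "|")
            else if enemy_x = i ∧ enemy_y = j then row ++ (enemy_sign ++ "|")
            else if exit_x = i ∧ exit_y = j then row ++ (exit_sing ++ "|")
            else row ++ "  |") "|") ++ "\n") ""
      = (PySem.List.pyRange 0 height 1).foldl (fun world_map j =>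
          world_map ++ ("|" ++ String.join ((PySem.List.pyRange 0 width 1).map (fun i =>
            pvCell char_x char_y char_sign enemy_x enemy_y enemy_sign exit_x exit_y exit_sing i j ++ "|")) ++ "\n")) "" := by
        apply PySem.List.foldl_congr_mem
        intro acc j _
        rw [hA j, String.append_assoc]
    _ = _ := by
        rw [string_foldl_append_join]
        simp [List.map_map, Function.comp_def]
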